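-- pv_equiv track=rewrite | github.com/mindu2kk/CodePTIT-Python | test.py | sotaanggiam
-- ===== SOURCE A (Python) =====
-- def sotaanggiam(n):
--     ok = 1
--     if len(n) < 3:
--         return "NO"
--     for i in range(0,len(n)-1):
--         if n[i] < n[i+1]:
--             if ok == 0:
--                 return "NO"
--             ok = 1
--         else:
--             ok = 0
--     return "YES"
-- ===== SOURCE B (Python) =====
-- def sotaanggiam(n):
--     if len(n) < 3:
--         return "NO"
--     i = 0
--     while i < len(n) - 1 and n[i] < n[i + 1]:
--         i += 1
--     while i < len(n) - 1 and n[i] >= n[i + 1]: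
--         i += 1
--     return "YES" if i == len(n) - 1 else "NO"
-- ===== Notes on version B (the rewrite author's own statement) =====
-- stated objective: simpler
-- what changed: Replaces the flagged for-loop over all adjacent pairs with a flag-free two-phase scan: walk the strictly increasing prefix, then the non-increasing suffix, and accept iff the scan reaches the end.
import Mathlib
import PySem

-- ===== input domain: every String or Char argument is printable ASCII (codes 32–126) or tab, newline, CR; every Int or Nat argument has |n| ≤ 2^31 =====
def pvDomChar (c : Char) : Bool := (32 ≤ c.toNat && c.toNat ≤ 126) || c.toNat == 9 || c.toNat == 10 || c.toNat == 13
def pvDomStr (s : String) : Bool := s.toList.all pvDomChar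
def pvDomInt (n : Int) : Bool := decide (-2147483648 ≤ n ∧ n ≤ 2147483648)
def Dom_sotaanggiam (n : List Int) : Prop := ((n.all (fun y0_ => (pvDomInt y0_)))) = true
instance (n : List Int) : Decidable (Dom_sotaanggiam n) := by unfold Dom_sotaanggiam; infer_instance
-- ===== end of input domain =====

-- ===== PORT A =====
-- B replaces A's flag-carrying for-loop with a flag-free two-phase scan (objective: simpler).
-- Literal port of A: the for-loop over adjacent pairs with the ok flag becomes a
-- structural recursion over the same adjacent pairs carrying the same ok state.
def sotaanggiamLoop : List Int → Int → String
  | a :: b :: rest, ok =>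
      if a < b then
        if ok = 0 then "NO" else sotaanggiamLoop (b :: rest) 1
      else
        sotaanggiamLoop (b :: rest) 0
  | _, _ => "YES"

def sotaanggiam (n : List Int) : String :=
  if n.length < 3 then "NO" else sotaanggiamLoop n 1

-- ===== PORT B =====
-- phase one: walk the strictly increasing prefix (i += 1 ↔ dropping the head)
def sotaanggiamUp : List Int → List Int
  | a :: b :: rest => if a < b then sotaanggiamUp (b :: rest) else a :: b :: rest
  | l => l

-- phase two: walk the non-increasing suffix
def sotaanggiamDown : List Int → List Int
  | a :: b :: rest => if a ≥ b then sotaanggiamDown (b :: rest) else a :: b :: rest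
  | l => l

-- i == len(n)-1 ↔ exactly one element of the list remains after both phases
def sotaanggiam_alt (n : List Int) : String :=
  if n.length < 3 then "NO"
  else if (sotaanggiamDown (sotaanggiamUp n)).length = 1 then "YES" else "NO"

-- ===== PRECONDITION & SPEC =====
def Spec_sotaanggiam (n : List Int) (out : String) : Prop := out = sotaanggiam_alt n
instance (n : List Int) (out : String) : Decidable (Spec_sotaanggiam n out) := by unfold Spec_sotaanggiam; infer_instance

-- ===== CLAIM (what is proved, stated in full; the proofs are below) =====
def Claim_equal_sotaanggiam : Prop := ∀ (n : List Int), Dom_sotaanggiam n → Spec_sotaanggiam n (sotaanggiam n)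

-- ===== LEMMAS AND PROOFS =====
theorem down_ne_nil : ∀ (l : List Int), l ≠ [] → sotaanggiamDown l ≠ [] := by
  intro l
  induction l with
  | nil => simp
  | cons a t ih =>
    intro _
    cases t with
    | nil => simp [sotaanggiamDown]
    | cons b r =>
      simp only [sotaanggiamDown]
      split
      · exact ih (by simp)
      · simp

theorem up_ne_nil : ∀ (l : List Int), l ≠ [] → sotaanggiamUp l ≠ [] := by
  intro l
  induction l with
  | nil => simp
  | cons a t ih =>
    intro _
    cases t with
    | nil => simp [sotaanggiamUp]
    | cons b r =>
      simp only [sotaanggiamUp]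
      split
      · exact ih (by simp)
      · simp

theorem loop0_eq : ∀ (l : List Int),
    sotaanggiamLoop l 0 = (if (sotaanggiamDown l).length ≤ 1 then "YES" else "NO") := by
  intro l
  induction l with
  | nil => simp [sotaanggiamLoop, sotaanggiamDown]
  | cons a t ih =>
    cases t with
    | nil => simp [sotaanggiamLoop, sotaanggiamDown]
    | cons b r =>
      simp only [sotaanggiamLoop, sotaanggiamDown]
      by_cases h : a < b
      · have h2 : ¬ a ≥ b := by omega
        simp only [if_pos h, if_neg h2]
        have := down_ne_nil (b :: r) (by simp)
        simp
      · have h2 : a ≥ b := by omega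
        simp [if_neg h, if_pos h2, ih]

theorem loop1_eq : ∀ (l : List Int),
    sotaanggiamLoop l 1 = (if (sotaanggiamDown (sotaanggiamUp l)).length ≤ 1 then "YES" else "NO") := by
  intro l
  induction l with
  | nil => simp [sotaanggiamLoop, sotaanggiamUp, sotaanggiamDown]
  | cons a t ih =>
    cases t with
    | nil => simp [sotaanggiamLoop, sotaanggiamUp, sotaanggiamDown]
    | cons b r =>
      simp only [sotaanggiamLoop, sotaanggiamUp]
      by_cases h : a < b
      · simp [if_pos h, ih]
      · have h2 : a ≥ b := by omega
        simp only [if_neg h, sotaanggiamDown, if_pos h2]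
        exact loop0_eq (b :: r)

-- ===== VERDICT (by name: the statement is the Claim_ definition above) =====
theorem sotaanggiam_spec : Claim_equal_sotaanggiam := by
  intro n _
  unfold Spec_sotaanggiam sotaanggiam sotaanggiam_alt
  by_cases h : n.length < 3
  · simp [h]
  · have hne : n ≠ [] := by
      intro e; subst e; simp at h
    have h1 := down_ne_nil (sotaanggiamUp n) (up_ne_nil n hne)
    rw [if_neg h, if_neg h, loop1_eq]
    have : (sotaanggiamDown (sotaanggiamUp n)).length ≠ 0 := by
      simpa [List.length_eq_zero_iff] using h1
    by_cases h2 : (sotaanggiamDown (sotaanggiamUp n)).length = 1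
    · simp [h2]
    · have : ¬ (sotaanggiamDown (sotaanggiamUp n)).length ≤ 1 := by omega
      simp [h2, this]
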